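-- pv_equiv track=rewrite | github.com/yash-goyal-0910/The-X-O-Game | ai.py | p_max
-- ===== SOURCE A (Python) =====
-- def p_max(M):
--     P = []
--     for n in range(10):
--         if n == 0:
--             continue
--         c = 0
--         for a in M:
--             if n in a:
--                 c = c + 1
--         P.append(c)
--     return P
-- ===== SOURCE B (Python) =====
-- def p_max(M):
--     counts = [0] * 9
--     for row in M:
--         for v in set(row):
--             if 1 <= v <= 9:
--                 counts[v - 1] += 1
--     return counts
-- ===== Notes on version B (the rewrite author's own statement) =====
-- stated objective: simpler
-- what changed: Replaced nine full rescans of M (one per digit 1-9) with a single pass that dedups each row and bumps a counter per distinct digit.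
import Mathlib
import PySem

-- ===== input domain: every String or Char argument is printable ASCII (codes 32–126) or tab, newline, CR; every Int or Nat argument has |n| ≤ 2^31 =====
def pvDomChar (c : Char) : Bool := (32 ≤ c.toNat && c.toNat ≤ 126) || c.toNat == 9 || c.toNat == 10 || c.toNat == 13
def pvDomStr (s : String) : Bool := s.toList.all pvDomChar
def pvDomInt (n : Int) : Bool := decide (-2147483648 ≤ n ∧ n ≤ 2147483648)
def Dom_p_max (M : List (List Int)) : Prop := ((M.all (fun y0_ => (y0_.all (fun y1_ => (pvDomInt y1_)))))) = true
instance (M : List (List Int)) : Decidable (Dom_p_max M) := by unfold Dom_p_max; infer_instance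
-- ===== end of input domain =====

-- B replaces A's nine full rescans of M (one per digit 1..9) with a single pass that
-- dedups each row and bumps a per-digit counter; objective: simpler.

-- ===== PORT A =====
def p_max (M : List (List Int)) : List Int :=
  (PySem.List.pyRange 0 10 1).foldl
    (fun P n =>
      if n == 0 then P
      else P ++ [M.foldl (fun c a => if n ∈ a then c + 1 else c) 0]) []

-- ===== PORT B =====
/-- B's inner-loop body: `if 1 <= v <= 9: counts[v - 1] += 1`. -/
def bump (cs : List Int) (v : Int) : List Int :=
  if 1 ≤ v ∧ v ≤ 9 then cs.modify (v - 1).toNat (· + 1) else cs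

-- 'for v in set(row)' iterates the row's distinct values; the counter bumps are
-- order-independent, so iterating PySem.Set.ofList row in its order is exact.
def p_max_alt (M : List (List Int)) : List Int :=
  M.foldl (fun counts row => (PySem.Set.ofList row).foldl bump counts)
    (List.replicate 9 0)

-- ===== PRECONDITION & SPEC =====
def Spec_p_max (M : List (List Int)) (out : List Int) : Prop := out = p_max_alt M
instance (M : List (List Int)) (out : List Int) : Decidable (Spec_p_max M out) := by unfold Spec_p_max; infer_instance

-- ===== CLAIM (what is proved, stated in full; the proofs are below) =====
def Claim_equal_p_max : Prop := ∀ (M : List (List Int)), Dom_p_max M → Spec_p_max M (p_max M)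

-- ===== LEMMAS AND PROOFS =====

/-- A's inner count: how many rows of `M` contain `n` (as A's fold computes it). -/
def cntA (n : Int) (M : List (List Int)) : Int :=
  M.foldl (fun c a => if n ∈ a then c + 1 else c) 0

theorem cntA_shift (n : Int) (M : List (List Int)) :
    ∀ c : Int, M.foldl (fun c a => if n ∈ a then c + 1 else c) c = c + cntA n M := by
  induction M with
  | nil => intro c; simp [cntA]
  | cons a t ih =>
      intro c
      unfold cntA
      rw [List.foldl_cons, List.foldl_cons, ih, ih]
      split_ifs <;> ring

theorem cntA_cons (n : Int) (a : List Int) (t : List (List Int)) :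
    cntA n (a :: t) = (if n ∈ a then 1 else 0) + cntA n t := by
  have h : cntA n (a :: t)
      = t.foldl (fun c a => if n ∈ a then c + 1 else c) (if n ∈ a then 0 + 1 else 0) := rfl
  rw [h, cntA_shift]
  split_ifs <;> ring

/-- A's result written out. -/
theorem p_max_eq (M : List (List Int)) :
    p_max M = [cntA 1 M, cntA 2 M, cntA 3 M, cntA 4 M, cntA 5 M,
               cntA 6 M, cntA 7 M, cntA 8 M, cntA 9 M] := by
  simp [p_max, PySem.List.pyRange, List.range_succ, cntA]

theorem length_bump (cs : List Int) (v : Int) : (bump cs v).length = cs.length := by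
  unfold bump; split_ifs <;> simp

theorem getD_modify (cs : List Int) (j i : ℕ) :
    (cs.modify j (· + 1)).getD i 0 =
      if i = j ∧ j < cs.length then cs.getD i 0 + 1 else cs.getD i 0 := by
  by_cases hi : i < cs.length
  · rw [List.getD_eq_getElem _ _ (by simpa using hi),
        List.getD_eq_getElem _ _ hi]
    rw [List.getElem_modify]
    by_cases h : j = i
    · subst h; simp [hi]
    · have h' : ¬ (i = j) := fun hh => h hh.symm
      simp [h, h']
  · have h1 : cs.length ≤ i := Nat.le_of_not_lt hi
    rw [List.getD_eq_default _ _ (by simpa using h1), List.getD_eq_default _ _ h1]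
    have : ¬ (i = j ∧ j < cs.length) := by rintro ⟨rfl, h⟩; omega
    simp [this]

theorem getD_bump (cs : List Int) (v : Int) (i : ℕ) (hi : i < cs.length) (hi9 : i < 9) :
    (bump cs v).getD i 0 =
      cs.getD i 0 + (if v = (i : Int) + 1 then 1 else 0) := by
  unfold bump
  by_cases hv : 1 ≤ v ∧ v ≤ 9
  · rw [if_pos hv, getD_modify]
    by_cases he : v = (i : Int) + 1
    · have h1 : (v - 1).toNat = i := by omega
      rw [h1, if_pos ⟨rfl, hi⟩, if_pos he]
    · have hne : ¬ (i = (v - 1).toNat ∧ (v - 1).toNat < cs.length) := by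
        rintro ⟨h1, -⟩; omega
      rw [if_neg hne, if_neg he]
      ring
  · have he : v ≠ (i : Int) + 1 := by omega
    simp [hv, he]

theorem inner_loop (s : List Int) :
    ∀ cs : List Int, s.Nodup → ∀ i : ℕ, i < cs.length → i < 9 →
      (s.foldl bump cs).getD i 0 =
        cs.getD i 0 + (if ((i : Int) + 1) ∈ s then 1 else 0) := by
  induction s with
  | nil => intro cs _ i _ _; simp
  | cons v t ih =>
      intro cs hnd i hi hi9
      rw [List.foldl_cons,
          ih (bump cs v) hnd.of_cons i (by rw [length_bump]; exact hi) hi9,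
          getD_bump cs v i hi hi9]
      by_cases he : v = (i : Int) + 1
      · have hnt : ((i : Int) + 1) ∉ t := he ▸ (List.nodup_cons.mp hnd).1
        simp [he, hnt]
      · have hne : ¬ ((i : Int) + 1 = v) := fun h => he h.symm
        simp only [List.mem_cons, hne, false_or, if_neg he]
        ring

theorem length_inner (s : List Int) : ∀ cs : List Int, (s.foldl bump cs).length = cs.length := by
  induction s with
  | nil => intro cs; rfl
  | cons v t ih => intro cs; rw [List.foldl_cons, ih, length_bump]

theorem length_outer (M : List (List Int)) :
    ∀ cs : List Int,
      (M.foldl (fun counts row => (PySem.Set.ofList row).foldl bump counts) cs).length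
        = cs.length := by
  induction M with
  | nil => intro cs; rfl
  | cons r t ih => intro cs; rw [List.foldl_cons, ih, length_inner]

theorem outer_loop (M : List (List Int)) :
    ∀ cs : List Int, cs.length = 9 → ∀ i : ℕ, i < 9 →
      (M.foldl (fun counts row => (PySem.Set.ofList row).foldl bump counts) cs).getD i 0
        = cs.getD i 0 + cntA ((i : Int) + 1) M := by
  induction M with
  | nil => intro cs _ i _; simp [cntA]
  | cons r t ih =>
      intro cs hlen i hi9
      rw [List.foldl_cons,
          ih _ (by rw [length_inner]; exact hlen) i hi9,
          inner_loop _ cs (PySem.Set.nodup_ofList r) i (by omega) hi9,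
          cntA_cons]
      simp only [PySem.Set.mem_ofList]
      ring

theorem p_max_alt_getD (M : List (List Int)) (i : ℕ) (hi9 : i < 9) :
    (p_max_alt M).getD i 0 = cntA ((i : Int) + 1) M := by
  unfold p_max_alt
  rw [outer_loop M (List.replicate 9 0) (by simp) i hi9]
  have h0 : (List.replicate 9 (0:Int)).getD i 0 = 0 := by interval_cases i <;> rfl
  rw [h0]
  ring

theorem p_max_alt_length (M : List (List Int)) : (p_max_alt M).length = 9 := by
  unfold p_max_alt
  rw [length_outer]
  simp

-- ===== VERDICT (by name: the statement is the Claim_ definition above) =====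
theorem p_max_spec : Claim_equal_p_max := by
  intro M _
  unfold Spec_p_max
  rw [p_max_eq M]
  apply List.ext_getElem (by simp [p_max_alt_length])
  intro i h1 h2
  have hi9 : i < 9 := by simpa using h1
  have hx := p_max_alt_getD M i hi9
  rw [List.getD_eq_getElem _ _ h2] at hx
  rw [hx]
  interval_cases i <;> norm_num
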